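-- pv_equiv track=rewrite | github.com/em3rch/prg-basics | 05-MockTest/p1.py | f
-- ===== SOURCE A (Python) =====
-- def f(amount_to_pay: int) -> int:
--     coins_5 = 0
--     coins_2 = 0
--     coins_1 = 0
--
--     while amount_to_pay != 0:
--         if (amount_to_pay % 5) != amount_to_pay:
--
--             coins_5 += ((amount_to_pay - (amount_to_pay % 5)) // 5)
--             amount_to_pay = amount_to_pay % 5
--
--         elif amount_to_pay % 2 != amount_to_pay:
--             coins_2 += ((amount_to_pay - (amount_to_pay % 2)) // 2)
--             amount_to_pay = amount_to_pay % 2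
--         elif amount_to_pay == 1:
--             coins_1 += 1
--             amount_to_pay = 0
--
--     return coins_5 + coins_2 + coins_1
-- ===== SOURCE B (Python) =====
-- def f(amount_to_pay: int) -> int:
--     # closed form: number of 5-coins, then split the remainder mod 5 into 2s and 1s
--     return amount_to_pay // 5 + (amount_to_pay % 5) // 2 + (amount_to_pay % 5) % 2
-- ===== Notes on version B (the rewrite author's own statement) =====
-- stated objective: simpler
-- what changed: Replaces the while-loop with accumulator variables by a single closed-form expression of floor divisions and remainders over the coin denominations.
import Mathlib
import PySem

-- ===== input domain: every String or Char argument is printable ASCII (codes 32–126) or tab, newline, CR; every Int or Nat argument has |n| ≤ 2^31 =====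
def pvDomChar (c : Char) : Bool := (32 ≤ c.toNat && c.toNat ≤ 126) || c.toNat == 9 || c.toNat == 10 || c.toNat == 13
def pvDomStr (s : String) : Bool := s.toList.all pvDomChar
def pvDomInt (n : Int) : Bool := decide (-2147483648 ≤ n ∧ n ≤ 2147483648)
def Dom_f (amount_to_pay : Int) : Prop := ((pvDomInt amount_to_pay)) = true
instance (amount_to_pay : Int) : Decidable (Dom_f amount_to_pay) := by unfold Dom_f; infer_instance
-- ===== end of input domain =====

-- ===== PORT A =====
-- B replaces A's while-loop by a closed-form expression (objective: simpler).
-- fLoop: literal transcription of A's while-loop; the fuel (4) only makes the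
-- always-terminating loop structurally recursive, it never runs out on any input.
def fLoop : Nat → Int → Int → Int → Int → Int
  | 0, _, c5, c2, c1 => c5 + c2 + c1
  | fuel+1, a, c5, c2, c1 =>
    if a = 0 then c5 + c2 + c1
    else if PySem.Int.mod a 5 ≠ a then
      fLoop fuel (PySem.Int.mod a 5) (c5 + PySem.Int.floordiv (a - PySem.Int.mod a 5) 5) c2 c1
    else if PySem.Int.mod a 2 ≠ a then
      fLoop fuel (PySem.Int.mod a 2) c5 (c2 + PySem.Int.floordiv (a - PySem.Int.mod a 2) 2) c1
    else if a = 1 then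
      fLoop fuel 0 c5 c2 (c1 + 1)
    else
      fLoop fuel a c5 c2 c1  -- no branch fires: unreachable (a%2 = a ∧ a ≠ 0 ∧ a ≠ 1 is impossible)

def f (amount_to_pay : Int) : Int := fLoop 4 amount_to_pay 0 0 0

-- ===== PORT B =====
def f_alt (amount_to_pay : Int) : Int :=
  PySem.Int.floordiv amount_to_pay 5
    + PySem.Int.floordiv (PySem.Int.mod amount_to_pay 5) 2
    + PySem.Int.mod (PySem.Int.mod amount_to_pay 5) 2

-- ===== PRECONDITION & SPEC =====
def Spec_f (amount_to_pay : Int) (out : Int) : Prop := out = f_alt amount_to_pay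
instance (amount_to_pay : Int) (out : Int) : Decidable (Spec_f amount_to_pay out) := by unfold Spec_f; infer_instance

-- ===== CLAIM (what is proved, stated in full; the proofs are below) =====
def Claim_equal_f : Prop := ∀ (amount_to_pay : Int), Dom_f amount_to_pay → Spec_f amount_to_pay (f amount_to_pay)

-- ===== LEMMAS AND PROOFS =====

-- After the first loop iteration the amount lies in [0,5); the rest of the loop
-- converts it into 2-coins and 1-coins.
theorem fLoop_small (m c5 : Int) (h0 : 0 ≤ m) (h5 : m < 5) :
    fLoop 3 m c5 0 0 = c5 + PySem.Int.floordiv m 2 + PySem.Int.mod m 2 := by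
  interval_cases m <;> simp [fLoop, PySem.Int.mod, PySem.Int.floordiv]

theorem f_eq_alt (n : Int) : f n = f_alt n := by
  have hmod5 : PySem.Int.mod n 5 = n % 5 :=
    PySem.Int.mod_eq_emod_of_pos (by norm_num : (0:Int) < 5)
  by_cases h : PySem.Int.mod n 5 = n
  · have hm : n % 5 = n := by rw [← hmod5]; exact h
    have h0 : 0 ≤ n := by omega
    have h5 : n < 5 := by omega
    interval_cases n <;> decide
  · have hne : n ≠ 0 := by
      intro h0; apply h; simp [h0, PySem.Int.mod]
    have hstep : f n = fLoop 3 (PySem.Int.mod n 5)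
        (0 + PySem.Int.floordiv (n - PySem.Int.mod n 5) 5) 0 0 := by
      show fLoop (3+1) n 0 0 0 = _
      rw [fLoop, if_neg hne, if_pos h]
    have h0 : 0 ≤ PySem.Int.mod n 5 := by rw [hmod5]; omega
    have h5 : PySem.Int.mod n 5 < 5 := by rw [hmod5]; omega
    rw [hstep, fLoop_small _ _ h0 h5]
    have hdiv : PySem.Int.floordiv (n - PySem.Int.mod n 5) 5 = PySem.Int.floordiv n 5 := by
      rw [hmod5, PySem.Int.floordiv_eq_ediv_of_pos (by norm_num : (0:Int) < 5),
          PySem.Int.floordiv_eq_ediv_of_pos (by norm_num : (0:Int) < 5)]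
      omega
    rw [hdiv]; unfold f_alt; ring

-- ===== VERDICT (by name: the statement is the Claim_ definition above) =====
theorem f_spec : Claim_equal_f := by
  intro n _
  unfold Spec_f
  exact f_eq_alt n
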